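-- pv_equiv track=rewrite | github.com/littleclouds/VISAPYQ | Minimum number of Coins.py | minPartition
-- ===== SOURCE A (Python) =====
-- def minPartition(N):
--     # list of denominations
--     denom = [1, 2, 5, 10, 20, 50, 100, 200, 500, 2000]
--     # initialize dp and dp2 arrays
--     dp = [0] * (N + 1)
--     dp2 = [0] * (N + 1)
--     for i in range(N):
--         # initialize dp with a large value
--         dp[i] = 9999999999999
--         # initialize dp2 with -1
--         dp2[i] = -1
--     # loop over the denominations
--     for j in range(10):
--         # loop over the values from 1 to N
--         for i in range(1, N+1):
--             if i >= denom[j]: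
--                 # update dp and dp2 arrays
--                 dp[i] = min(dp[i], 1+dp[i-denom[j]])
--                 dp2[i] = j
--     # initialize variables
--     k = N
--     num = []
--     i = N
--     # construct the partition
--     while i > 0 and N >=0:
--         if dp2[i] != -1:
--             num.append(denom[dp2[i]])
--         N = N - denom[dp2[i]]
--         i = N
--     # return the partition
--     return num
-- ===== SOURCE B (Python) =====
-- def minPartition(N):
--     # Greedy with division: for each denomination (largest first) take as
--     # many coins as fit at once.  O(#denominations) instead of O(N * #denoms).
--     res = []
--     for d in (2000, 500, 200, 100, 50, 20, 10, 5, 2, 1):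
--         if N >= d:
--             q, N = divmod(N, d)
--             res.extend([d] * q)
--     return res
-- ===== Notes on version B (the rewrite author's own statement) =====
-- stated objective: faster
-- what changed: A builds O(N)-size dp/dp2 tables with a 10xN DP loop and then reconstructs one coin at a time; since A's dp2[i] is unconditionally the index of the largest denomination <= i, B replaces all of it with a direct greedy divmod over the ten denominations, taking all coins of each denomination at once.
import Mathlib
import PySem

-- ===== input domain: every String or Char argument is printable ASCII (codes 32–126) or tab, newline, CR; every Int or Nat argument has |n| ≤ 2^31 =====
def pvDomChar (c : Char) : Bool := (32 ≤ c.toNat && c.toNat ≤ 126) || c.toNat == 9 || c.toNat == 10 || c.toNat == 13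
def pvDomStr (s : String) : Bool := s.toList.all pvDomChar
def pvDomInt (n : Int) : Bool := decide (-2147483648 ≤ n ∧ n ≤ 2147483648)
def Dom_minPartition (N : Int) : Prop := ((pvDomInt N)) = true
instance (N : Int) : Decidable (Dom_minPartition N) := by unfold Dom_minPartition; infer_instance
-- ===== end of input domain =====

-- B replaces A's O(N)-size DP tables and one-coin-at-a-time reconstruction by a direct
-- greedy divmod over the ten denominations (same return value; A raises nowhere on Dom).

-- ===== PORT A =====
def pvDenom : List Int := [1, 2, 5, 10, 20, 50, 100, 200, 500, 2000]

-- the 'for i in range(N)' initialization pass over the pair (dp, dp2)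
def pvInitPass (N : Int) (s : List Int × List Int) : List Int × List Int :=
  (PySem.List.pyRange 0 N 1).foldl
    (fun (s : List Int × List Int) i =>
      (s.1.set i.toNat 9999999999999, s.2.set i.toNat (-1))) s

-- the 'for i in range(1, N+1)' body of the 'for j in range(10)' DP loop
def pvDPPass (N : Int) (s : List Int × List Int) (j : Int) : List Int × List Int :=
  (PySem.List.pyRange 1 (N + 1) 1).foldl
    (fun (s : List Int × List Int) i =>
      if (PySem.List.pyGet? pvDenom j).getD 0 ≤ i then
        (s.1.set i.toNat (min (s.1.getD i.toNat 0)
            (1 + s.1.getD (i - (PySem.List.pyGet? pvDenom j).getD 0).toNat 0)),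
         s.2.set i.toNat j)
      else s) s

-- the reconstruction 'while i > 0 and N >= 0' loop; fuel N.toNat + 1 suffices because each
-- executed iteration decreases i = N by at least 1 (all denominations are ≥ 1)
def minPartitionLoop (dp2 : List Int) : Nat → Int → Int → List Int → List Int
  | 0, _, _, num => num
  | fuel + 1, i, n, num =>
    if i > 0 ∧ n ≥ 0 then
      let j := dp2.getD i.toNat 0
      let num' := if j ≠ -1 then num ++ [(PySem.List.pyGet? pvDenom j).getD 0] else num
      let n' := n - (PySem.List.pyGet? pvDenom j).getD 0
      minPartitionLoop dp2 fuel n' n' num'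
    else num

def minPartition (N : Int) : List Int :=
  -- dp = [0]*(N+1); dp2 = [0]*(N+1); the init pass and the 10 DP passes; then the while loop
  minPartitionLoop
    ((PySem.List.pyRange 0 10 1).foldl (pvDPPass N)
      (pvInitPass N (List.replicate (N + 1).toNat 0, List.replicate (N + 1).toNat 0))).2
    (N.toNat + 1) N N []

-- ===== PORT B =====
-- one step of B's loop over the denominations (largest first): take all coins of d at once
def pvBStep (s : List Int × Int) (d : Int) : List Int × Int :=
  if d ≤ s.2 then
    (s.1 ++ List.replicate (PySem.Int.floordiv s.2 d).toNat d, PySem.Int.mod s.2 d)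
  else s

def minPartition_alt (N : Int) : List Int :=
  (([2000, 500, 200, 100, 50, 20, 10, 5, 2, 1] : List Int).foldl pvBStep ([], N)).1

-- ===== PRECONDITION & SPEC =====
def Spec_minPartition (N : Int) (out : List Int) : Prop := out = minPartition_alt N
instance (N : Int) (out : List Int) : Decidable (Spec_minPartition N out) := by unfold Spec_minPartition; infer_instance

-- ===== CLAIM (what is proved, stated in full; the proofs are below) =====
def Claim_equal_minPartition : Prop := ∀ (N : Int), Dom_minPartition N → Spec_minPartition N (minPartition N)

-- ===== LEMMAS AND PROOFS =====

-- the largest denomination ≤ i (for i ≥ 1; 1 for i < 1), and its index in pvDenom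
def maxden (i : Int) : Int :=
  if 2000 ≤ i then 2000 else if 500 ≤ i then 500 else if 200 ≤ i then 200
  else if 100 ≤ i then 100 else if 50 ≤ i then 50 else if 20 ≤ i then 20
  else if 10 ≤ i then 10 else if 5 ≤ i then 5 else if 2 ≤ i then 2 else 1

def gIdx (i : Int) : Int :=
  if 2000 ≤ i then 9 else if 500 ≤ i then 8 else if 200 ≤ i then 7
  else if 100 ≤ i then 6 else if 50 ≤ i then 5 else if 20 ≤ i then 4
  else if 10 ≤ i then 3 else if 5 ≤ i then 2 else if 2 ≤ i then 1 else 0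

lemma maxden_pos (i : Int) : 1 ≤ maxden i := by
  unfold maxden; split_ifs <;> omega

lemma maxden_le (i : Int) (h : 1 ≤ i) : maxden i ≤ i := by
  unfold maxden; split_ifs <;> omega

lemma gIdx_nonneg (i : Int) : 0 ≤ gIdx i := by
  unfold gIdx; split_ifs <;> omega

lemma pyGet_gIdx (i : Int) : (PySem.List.pyGet? pvDenom (gIdx i)).getD 0 = maxden i := by
  unfold gIdx maxden; split_ifs <;> decide

set_option maxHeartbeats 1000000 in
lemma maxden_between (x y d : Int) (hm : maxden x = d) (hdy : d ≤ y) (hyx : y ≤ x) :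
    maxden y = d := by
  unfold maxden at hm ⊢; split_ifs at hm <;> split_ifs <;> omega

-- one-coin-at-a-time greedy (the value both programs compute)
def greedy1 (x : Int) : List Int :=
  if _h : x ≤ 0 then [] else maxden x :: greedy1 (x - maxden x)
termination_by x.toNat
decreasing_by
  have h1 := maxden_pos x
  have h2 := maxden_le x (by omega)
  omega

lemma greedy1_nonpos (x : Int) (h : x ≤ 0) : greedy1 x = [] := by
  rw [greedy1]; exact dif_pos h

lemma greedy1_pos (x : Int) (h : 0 < x) :
    greedy1 x = maxden x :: greedy1 (x - maxden x) := by
  rw [greedy1]; exact dif_neg (by omega)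

-- greedy takes all x/d coins of the current largest denomination d at once
lemma greedy_div (x d : Int) (h0 : 0 < x) (hm : maxden x = d) :
    greedy1 x = List.replicate (x / d).toNat d ++ greedy1 (x % d) := by
  have hd1 : 1 ≤ d := hm ▸ maxden_pos x
  have hdx : d ≤ x := hm ▸ maxden_le x (by omega)
  have hq1 : 1 ≤ x / d := (Int.le_ediv_iff_mul_le (by omega : (0:Int) < d)).2 (by omega)
  have hstep : greedy1 x = d :: greedy1 (x - d) := by rw [greedy1_pos x h0, hm]
  by_cases h2 : x - d < d
  · have hq : x / d = 1 := by
      have hlt : x / d < 2 := by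
        rw [Int.ediv_lt_iff_lt_mul (by omega : (0:Int) < d)]
        omega
      omega
    have hr : x % d = x - d := by
      have := Int.emod_def x d
      rw [this, hq]; ring
    rw [hstep, hq, hr]; rfl
  · have hm' : maxden (x - d) = d := maxden_between x (x - d) d hm (by omega) (by omega)
    have hrec := greedy_div (x - d) d (by omega) hm'
    have hdiv : (x - d) / d = x / d - 1 := by
      have := Int.add_mul_ediv_right x (-1) (by omega : d ≠ 0)
      have e : x + -1 * d = x - d := by ring
      rw [e] at this; omega
    have hmod : (x - d) % d = x % d := by
      conv_lhs => rw [Int.sub_emod, Int.emod_self]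
      simp [Int.emod_emod_of_dvd]
    rw [hstep, hrec, hdiv, hmod]
    have ht : (x / d).toNat = ((x / d - 1)).toNat + 1 := by omega
    rw [ht, List.replicate_succ]
    rfl
termination_by x.toNat
decreasing_by omega

-- B's fold over a suffix of the denomination list computes greedy1, given a cap
lemma bchain (d C : Int) (rest : List Int) (hd : 0 < d)
    (hmax : ∀ x, d ≤ x → x < C → maxden x = d)
    (hrest : ∀ x res, 0 ≤ x → x < d → (rest.foldl pvBStep (res, x)).1 = res ++ greedy1 x) :
    ∀ x res, 0 ≤ x → x < C → ((d :: rest).foldl pvBStep (res, x)).1 = res ++ greedy1 x := by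
  intro x res h0 hC'
  rw [List.foldl_cons]
  by_cases h : d ≤ x
  · have hm := hmax x h hC'
    have hq := greedy_div x d (by omega) hm
    show ((rest.foldl pvBStep (pvBStep (res, x) d)).1 = _)
    rw [show pvBStep (res, x) d =
        (res ++ List.replicate (x / d).toNat d, x % d) by
      unfold pvBStep
      rw [if_pos h, PySem.Int.floordiv_eq_ediv_of_pos hd, PySem.Int.mod_eq_emod_of_pos hd]]
    rw [hrest (x % d) _ (Int.emod_nonneg x (by omega)) (Int.emod_lt_of_pos x hd)]
    rw [hq, List.append_assoc]
  · rw [show pvBStep (res, x) d = (res, x) by unfold pvBStep; rw [if_neg h]]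
    exact hrest x res h0 (by omega)

lemma bchain_nil : ∀ x res, (0:Int) ≤ x → x < 1 → (([] : List Int).foldl pvBStep (res, x)).1 = res ++ greedy1 x := by
  intro x res h0 h1
  have : x = 0 := by omega
  subst this
  simp [greedy1_nonpos 0 le_rfl]

lemma alt_eq_greedy (N : Int) : minPartition_alt N = greedy1 N := by
  have c1 := bchain 1 2 [] (by omega) (by intro x h1 h2; unfold maxden; split_ifs <;> omega) bchain_nil
  have c2 := bchain 2 5 [1] (by omega) (by intro x h1 h2; unfold maxden; split_ifs <;> omega) c1
  have c5 := bchain 5 10 [2,1] (by omega) (by intro x h1 h2; unfold maxden; split_ifs <;> omega) c2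
  have c10 := bchain 10 20 [5,2,1] (by omega) (by intro x h1 h2; unfold maxden; split_ifs <;> omega) c5
  have c20 := bchain 20 50 [10,5,2,1] (by omega) (by intro x h1 h2; unfold maxden; split_ifs <;> omega) c10
  have c50 := bchain 50 100 [20,10,5,2,1] (by omega) (by intro x h1 h2; unfold maxden; split_ifs <;> omega) c20
  have c100 := bchain 100 200 [50,20,10,5,2,1] (by omega) (by intro x h1 h2; unfold maxden; split_ifs <;> omega) c50
  have c200 := bchain 200 500 [100,50,20,10,5,2,1] (by omega) (by intro x h1 h2; unfold maxden; split_ifs <;> omega) c100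
  have c500 := bchain 500 2000 [200,100,50,20,10,5,2,1] (by omega) (by intro x h1 h2; unfold maxden; split_ifs <;> omega) c200
  by_cases h0 : 0 ≤ N
  · by_cases h2000 : N < 2000
    · have := bchain 2000 (N+1) [500,200,100,50,20,10,5,2,1] (by omega)
        (by intro x h1 h2; unfold maxden; split_ifs <;> omega) c500 N [] h0 (by omega)
      simpa [minPartition_alt] using this
    · have := bchain 2000 (N+1) [500,200,100,50,20,10,5,2,1] (by omega)
        (by intro x h1 h2; unfold maxden; split_ifs <;> omega) c500 N [] h0 (by omega)
      simpa [minPartition_alt] using this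
  · unfold minPartition_alt
    have hall : ∀ l : List Int, (∀ d ∈ l, 1 ≤ d) → (l.foldl pvBStep ([], N)).1 = [] := by
      intro l
      induction l with
      | nil => intro _; rfl
      | cons a t ih =>
        intro hmem
        rw [List.foldl_cons, show pvBStep ([], N) a = ([], N) by
          unfold pvBStep; rw [if_neg (by have := hmem a (by simp); omega)]]
        exact ih (fun d hd => hmem d (by simp [hd]))
    rw [hall _ (by intro d hd; fin_cases hd <;> omega), greedy1_nonpos N (by omega)]

-- ---------- the dp2 array A builds ----------

-- the dp2 component of A's table construction
def passG (N j : Int) (b : List Int) : List Int :=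
  (PySem.List.pyRange 1 (N + 1) 1).foldl
    (fun t i => if (PySem.List.pyGet? pvDenom j).getD 0 ≤ i then t.set i.toNat j else t) b

def dp2F (N : Int) : List Int :=
  (([0,1,2,3,4,5,6,7,8,9] : List Int)).foldl (fun b j => passG N j b)
    ((PySem.List.pyRange 0 N 1).foldl (fun t i => t.set i.toNat (-1))
      (List.replicate (N + 1).toNat 0))

lemma foldl_length_inv {γ : Type} (xs : List γ) (f : List Int → γ → List Int)
    (h : ∀ t i, (f t i).length = t.length) : ∀ l0, (xs.foldl f l0).length = l0.length := by
  induction xs with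
  | nil => intro l0; rfl
  | cons a t ih => intro l0; rw [List.foldl_cons, ih, h]

lemma passG_length (N j : Int) (b : List Int) : (passG N j b).length = b.length := by
  unfold passG
  exact foldl_length_inv _ _ (by intro t i; split <;> simp) b

lemma init_length (N : Int) :
    ((PySem.List.pyRange 0 N 1).foldl (fun t i => t.set i.toNat (-1))
      (List.replicate (N + 1).toNat (0:Int))).length = (N + 1).toNat := by
  rw [foldl_length_inv _ _ (by intro t i; simp), List.length_replicate]

-- projection: .2 of A's paired DP fold is the dp2-only fold
lemma dppass_snd (j : Int) : ∀ (l : List Int) (s : List Int × List Int),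
    (l.foldl (fun (s : List Int × List Int) i =>
      if (PySem.List.pyGet? pvDenom j).getD 0 ≤ i then
        (s.1.set i.toNat (min (s.1.getD i.toNat 0)
            (1 + s.1.getD (i - (PySem.List.pyGet? pvDenom j).getD 0).toNat 0)),
         s.2.set i.toNat j)
      else s) s).2
    = l.foldl (fun t i => if (PySem.List.pyGet? pvDenom j).getD 0 ≤ i then t.set i.toNat j else t) s.2 := by
  intro l
  induction l with
  | nil => intro s; rfl
  | cons a t ih =>
    intro s
    rw [List.foldl_cons, List.foldl_cons]
    by_cases h : (PySem.List.pyGet? pvDenom j).getD 0 ≤ a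
    · rw [if_pos h, if_pos h, ih]
    · rw [if_neg h, if_neg h, ih]

lemma dpfold_snd (N : Int) : ∀ (l : List Int) (s : List Int × List Int),
    (l.foldl (pvDPPass N) s).2 = l.foldl (fun b j => passG N j b) s.2 := by
  intro l
  induction l with
  | nil => intro s; rfl
  | cons a t ih =>
    intro s
    rw [List.foldl_cons, List.foldl_cons, ih]
    congr 1
    unfold pvDPPass passG
    exact dppass_snd a _ s

lemma initpass_snd (N : Int) (s : List Int × List Int) :
    (pvInitPass N s).2 = (PySem.List.pyRange 0 N 1).foldl (fun t i => t.set i.toNat (-1)) s.2 := by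
  unfold pvInitPass
  induction (PySem.List.pyRange 0 N 1) generalizing s with
  | nil => rfl
  | cons a t ih => rw [List.foldl_cons, List.foldl_cons, ih]

lemma minPartition_eq (N : Int) :
    minPartition N = minPartitionLoop (dp2F N) (N.toNat + 1) N N [] := by
  unfold minPartition dp2F
  rw [dpfold_snd, initpass_snd]
  rw [show PySem.List.pyRange 0 10 1 = ([0,1,2,3,4,5,6,7,8,9] : List Int) from by decide]

-- pointwise value of a conditional set-fold over a range (each index written at most once)
lemma foldl_set_getD (c : Int → Prop) [DecidablePred c] (v : Int) :
    ∀ (n : Nat) (a b : Int) (l : List Int), 0 ≤ a → (b - a).toNat = n → b ≤ (l.length : Int) →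
    ∀ (k : Nat),
    ((PySem.List.pyRange a b 1).foldl (fun t i => if c i then t.set i.toNat v else t) l).getD k 0
    = if a ≤ (k:Int) ∧ (k:Int) < b ∧ c (k:Int) then v else l.getD k 0 := by
  intro n
  induction n with
  | zero =>
    intro a b l ha hn hb k
    rw [PySem.List.pyRange_one_eq_nil (by omega)]
    rw [if_neg (by rintro ⟨h1, h2, _⟩; omega)]
    rfl
  | succ m ih =>
    intro a b l ha hn hb k
    have hab : a < b := by omega
    rw [PySem.List.pyRange_one_cons hab, List.foldl_cons]
    by_cases hca : c a
    · rw [if_pos hca,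
        ih (a+1) b (l.set a.toNat v) (by omega) (by omega) (by rw [List.length_set]; exact hb)]
      by_cases hk : (k:Int) = a
      · have hkn : k = a.toNat := by omega
        have hkl : k < l.length := by omega
        rw [if_neg (by rintro ⟨h1, _, _⟩; omega),
          if_pos ⟨by omega, by omega, by rwa [hk]⟩]
        subst hkn
        simp [List.getD, hkl]
      · have hset : (l.set a.toNat v).getD k 0 = l.getD k 0 := by
          simp only [List.getD]
          rw [List.getElem?_set]
          rw [if_neg (by omega)]
        rw [hset]
        exact if_congr ⟨fun ⟨h1,h2,h3⟩ => ⟨by omega, h2, h3⟩,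
          fun ⟨h1,h2,h3⟩ => ⟨by omega, h2, h3⟩⟩ rfl rfl
    · rw [if_neg hca, ih (a+1) b l (by omega) (by omega) hb]
      refine if_congr ⟨fun ⟨h1,h2,h3⟩ => ⟨by omega, h2, h3⟩, fun ⟨h1,h2,h3⟩ => ⟨?_, h2, h3⟩⟩ rfl rfl
      by_cases hk : (k:Int) = a
      · exact absurd (by rwa [hk] at h3) hca
      · omega

-- unconditional variant, for the '-1' initialization pass
lemma foldl_set_getD0 (v : Int) :
    ∀ (n : Nat) (a b : Int) (l : List Int), 0 ≤ a → (b - a).toNat = n → b ≤ (l.length : Int) →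
    ∀ (k : Nat),
    ((PySem.List.pyRange a b 1).foldl (fun t i => t.set i.toNat v) l).getD k 0
    = if a ≤ (k:Int) ∧ (k:Int) < b then v else l.getD k 0 := by
  intro n
  induction n with
  | zero =>
    intro a b l ha hn hb k
    rw [PySem.List.pyRange_one_eq_nil (by omega)]
    rw [if_neg (by rintro ⟨h1, h2⟩; omega)]
    rfl
  | succ m ih =>
    intro a b l ha hn hb k
    have hab : a < b := by omega
    rw [PySem.List.pyRange_one_cons hab, List.foldl_cons,
      ih (a+1) b (l.set a.toNat v) (by omega) (by omega) (by rw [List.length_set]; exact hb)]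
    by_cases hk : (k:Int) = a
    · have hkn : k = a.toNat := by omega
      have hkl : k < l.length := by omega
      rw [if_neg (by rintro ⟨h1, _⟩; omega), if_pos ⟨by omega, by omega⟩]
      subst hkn
      simp [List.getD, hkl]
    · have hset : (l.set a.toNat v).getD k 0 = l.getD k 0 := by
        simp only [List.getD]
        rw [List.getElem?_set, if_neg (by omega)]
      rw [hset]
      exact if_congr ⟨fun ⟨h1,h2⟩ => ⟨by omega, h2⟩, fun ⟨h1,h2⟩ => ⟨by omega, h2⟩⟩ rfl rfl

lemma passG_getD (N j : Int) (b : List Int) (hb : b.length = (N + 1).toNat) (hN : 0 ≤ N) (k : Nat) :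
    (passG N j b).getD k 0
    = if 1 ≤ (k:Int) ∧ (k:Int) < N + 1 ∧ (PySem.List.pyGet? pvDenom j).getD 0 ≤ (k:Int)
      then j else b.getD k 0 := by
  unfold passG
  exact foldl_set_getD _ j ((N + 1 - 1).toNat) 1 (N+1) b (by omega) rfl (by omega) k

set_option maxHeartbeats 1600000 in
lemma dp2F_getD (N : Int) (k : Nat) (hk1 : 1 ≤ (k:Int)) (hk2 : (k:Int) ≤ N) :
    (dp2F N).getD k 0 = gIdx k := by
  have hN : 0 ≤ N := by omega
  unfold dp2F
  simp only [List.foldl_cons, List.foldl_nil]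
  rw [passG_getD N 9 _ (by simp [passG_length, init_length]) hN k]
  rw [passG_getD N 8 _ (by simp [passG_length, init_length]) hN k]
  rw [passG_getD N 7 _ (by simp [passG_length, init_length]) hN k]
  rw [passG_getD N 6 _ (by simp [passG_length, init_length]) hN k]
  rw [passG_getD N 5 _ (by simp [passG_length, init_length]) hN k]
  rw [passG_getD N 4 _ (by simp [passG_length, init_length]) hN k]
  rw [passG_getD N 3 _ (by simp [passG_length, init_length]) hN k]
  rw [passG_getD N 2 _ (by simp [passG_length, init_length]) hN k]
  rw [passG_getD N 1 _ (by simp [passG_length, init_length]) hN k]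
  rw [passG_getD N 0 _ (by simp [init_length]) hN k]
  rw [foldl_set_getD0 (-1) (N - 0).toNat 0 N _ (by omega) rfl (by simp) k]
  have e0 : (PySem.List.pyGet? pvDenom 0).getD 0 = 1 := by decide
  have e1 : (PySem.List.pyGet? pvDenom 1).getD 0 = 2 := by decide
  have e2 : (PySem.List.pyGet? pvDenom 2).getD 0 = 5 := by decide
  have e3 : (PySem.List.pyGet? pvDenom 3).getD 0 = 10 := by decide
  have e4 : (PySem.List.pyGet? pvDenom 4).getD 0 = 20 := by decide
  have e5 : (PySem.List.pyGet? pvDenom 5).getD 0 = 50 := by decide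
  have e6 : (PySem.List.pyGet? pvDenom 6).getD 0 = 100 := by decide
  have e7 : (PySem.List.pyGet? pvDenom 7).getD 0 = 200 := by decide
  have e8 : (PySem.List.pyGet? pvDenom 8).getD 0 = 500 := by decide
  have e9 : (PySem.List.pyGet? pvDenom 9).getD 0 = 2000 := by decide
  rw [e0, e1, e2, e3, e4, e5, e6, e7, e8, e9]
  have hB : ((k:Int)) < N + 1 := by omega
  simp only [eq_true hk1, eq_true hB, true_and]
  unfold gIdx
  split_ifs <;> omega

-- ---------- the reconstruction loop is one-at-a-time greedy ----------

lemma loop_eq (dp2 : List Int) (M : Int)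
    (hdp : ∀ k : Nat, 1 ≤ (k:Int) → (k:Int) ≤ M → dp2.getD k 0 = gIdx k) :
    ∀ (fuel : Nat) (i : Int) (acc : List Int), 0 ≤ i → i ≤ M → i.toNat < fuel →
    minPartitionLoop dp2 fuel i i acc = acc ++ greedy1 i := by
  intro fuel
  induction fuel with
  | zero => intro i acc _ _ h; omega
  | succ m ih =>
    intro i acc h0 hM hf
    by_cases hi : 0 < i
    · have hj : dp2.getD i.toNat 0 = gIdx i := by
        have := hdp i.toNat (by omega) (by omega)
        rwa [Int.toNat_of_nonneg h0] at this
      show (if i > 0 ∧ i ≥ 0 then _ else _) = _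
      rw [if_pos ⟨hi, h0⟩]
      simp only [hj]
      rw [if_pos (by have := gIdx_nonneg i; omega)]
      rw [pyGet_gIdx i]
      have hpos := maxden_pos i
      have hle := maxden_le i (by omega)
      rw [ih (i - maxden i) _ (by omega) (by omega) (by omega)]
      rw [greedy1_pos i hi, List.append_assoc]
      rfl
    · have hi0 : i = 0 := by omega
      subst hi0
      show (if (0:Int) > 0 ∧ (0:Int) ≥ 0 then _ else _) = _
      rw [if_neg (by rintro ⟨h, _⟩; omega), greedy1_nonpos 0 le_rfl, List.append_nil]

-- ===== VERDICT (by name: the statement is the Claim_ definition above) =====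
theorem minPartition_spec : Claim_equal_minPartition := by
  intro N _
  unfold Spec_minPartition
  rw [minPartition_eq, alt_eq_greedy]
  by_cases h0 : 0 ≤ N
  · exact loop_eq (dp2F N) N (fun k hk1 hk2 => dp2F_getD N k hk1 hk2) (N.toNat + 1) N []
      h0 le_rfl (by omega)
  · rw [greedy1_nonpos N (by omega)]
    show (if N > 0 ∧ N ≥ 0 then _ else _) = _
    rw [if_neg (by rintro ⟨h, _⟩; omega)]
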